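-- pv_equiv track=rewrite | github.com/Samm07/Code-Library | alice.py | f
-- ===== SOURCE A (Python) =====
-- import math
--
-- def isPrime(n):
--
--     if n<=1:
--         return False
--     if n==2:
--         return True
--     if n>2 and n%2==0:
--         return False
--
--     max_div=math.floor(math.sqrt(n))
--     for i in range(3,1+max_div,2):
--         if n%i==0:
--             return False
--     return True
--
-- def returnFactors(x):
--     l=[]
--     i=2
--     while i<=x//2:
--         if len(l)==0:
--             if x%i==0:
--                 l.append(i)
--
--         if len(l)==1 and l[0]==2:
--             if x%x//2==0:
--                 l.append(x//2)
--                 return l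
--
--         if len(l)==1:
--             if x%i==0 and l[0]*i==x:
--                 l.append(i)
--
--         if len(l)==2:
--             return l
--
--         i+=1
--
-- def f(x):
--     if x==1:
--         return 0
--
--     elif isPrime(x):
--         return 1
--
--     else:
--         l=returnFactors(x)
--         first=l[0]
--         second=l[1]
--         return (second*f(first)+first*f(second))
-- ===== SOURCE B (Python) =====
-- def f(x):
--     d = 0
--     n = x
--     p = 2
--     while p * p <= n:
--         while n % p == 0:
--             n //= p
--             d += x // p
--         p += 1
--     if n > 1:
--         d += x // n
--     return d
-- ===== Notes on version B (the rewrite author's own statement) =====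
-- stated objective: faster
-- what changed: Replaces the recursive Leibniz-rule derivative (which re-scans divisors up to x//2 per factor split and recurses on both factors) with a single trial-division loop to sqrt(n) that accumulates sum of x//p over the prime factorization with multiplicity, no recursion at all.
-- outside the precondition, e.g. on f(0): A raises TypeError, B returns 0
import Mathlib
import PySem

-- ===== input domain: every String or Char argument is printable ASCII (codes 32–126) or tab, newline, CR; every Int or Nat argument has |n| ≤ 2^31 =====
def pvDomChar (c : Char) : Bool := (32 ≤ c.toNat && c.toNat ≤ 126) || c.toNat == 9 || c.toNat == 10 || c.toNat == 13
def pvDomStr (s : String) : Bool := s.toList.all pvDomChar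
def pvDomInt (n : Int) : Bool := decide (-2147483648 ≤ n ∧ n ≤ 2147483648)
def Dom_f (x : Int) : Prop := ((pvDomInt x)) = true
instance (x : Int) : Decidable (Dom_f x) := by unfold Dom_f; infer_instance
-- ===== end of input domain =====

-- B replaces A's recursive Leibniz-rule derivative (factor scan up to x//2 per split) with one
-- trial-division loop to sqrt(n) accumulating x//p per prime factor (objective: faster).

-- ===== PORT A =====
-- isPrime(n): math.floor(math.sqrt(n)) is exactly Nat.sqrt on 0 ≤ n ≤ 2^31 (the double sqrt of
-- such n is correctly rounded and its floor equals the integer square root there).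
def isPrimeA (n : Int) : Bool :=
  if n ≤ 1 then false
  else if n = 2 then true
  else if 2 < n ∧ PySem.Int.mod n 2 = 0 then false
  else
    let maxDiv : Int := (Nat.sqrt n.toNat : Int)
    -- for i in range(3, 1+max_div, 2): if n % i == 0: return False / return True
    (PySem.List.pyRange 3 (1 + maxDiv) 2).all (fun i => !(PySem.Int.mod n i == 0))

-- while i <= x//2 loop of returnFactors, state (i, l); fuel bounds the iteration count
-- (the loop runs at most x//2 - 1 times); none = fell off the loop / fuel out, i.e. Python's None.
def rfLoop (x : Int) : Nat → Int → List Int → Option (List Int)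
  | 0, _, _ => none
  | fuel+1, i, l =>
    if i ≤ PySem.Int.floordiv x 2 then
      -- if len(l)==0: if x%i==0: l.append(i)
      let l1 := if l.length = 0 ∧ PySem.Int.mod x i = 0 then l ++ [i] else l
      -- if len(l)==1 and l[0]==2: if x%x//2==0: l.append(x//2); return l
      if l1.length = 1 ∧ PySem.List.pyGetD l1 0 0 = 2 ∧
          PySem.Int.floordiv (PySem.Int.mod x x) 2 = 0 then
        some (l1 ++ [PySem.Int.floordiv x 2])
      else
        -- if len(l)==1: if x%i==0 and l[0]*i==x: l.append(i)
        let l2 := if l1.length = 1 ∧ PySem.Int.mod x i = 0 ∧ PySem.List.pyGetD l1 0 0 * i = x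
                  then l1 ++ [i] else l1
        -- if len(l)==2: return l
        if l2.length = 2 then some l2 else rfLoop x fuel (i + 1) l2
    else none

def returnFactorsA (x : Int) : Option (List Int) := rfLoop x (x.toNat + 1) 2 []

-- f with fuel for the recursion depth (each recursive argument is at most x//2)
def fA : Nat → Int → Int
  | 0, _ => 0
  | fuel+1, x =>
    if x = 1 then 0
    else if isPrimeA x then 1
    else
      match returnFactorsA x with
      | none => 0   -- Python raises TypeError here (returnFactors returned None); outside Pre_f
      | some l =>
        let first := PySem.List.pyGetD l 0 0
        let second := PySem.List.pyGetD l 1 0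
        second * fA fuel first + first * fA fuel second

def f (x : Int) : Int := fA x.toNat x

-- ===== PORT B =====
-- inner: while n % p == 0: n //= p; d += x // p   (fuel: n shrinks every step)
def stripLoop (x p : Int) : Nat → Int → Int → Int × Int
  | 0, n, d => (n, d)
  | fuel+1, n, d =>
    if PySem.Int.mod n p = 0 then
      stripLoop x p fuel (PySem.Int.floordiv n p) (d + PySem.Int.floordiv x p)
    else (n, d)

-- outer: while p*p <= n: …; p += 1; then if n > 1: d += x // n
def outerLoop (x : Int) : Nat → Int → Int → Int → Int
  | 0, _, _, d => d
  | fuel+1, p, n, d =>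
    if p * p ≤ n then
      let r := stripLoop x p n.toNat n d
      outerLoop x fuel (p + 1) r.1 r.2
    else if 1 < n then d + PySem.Int.floordiv x n else d

def f_alt (x : Int) : Int := outerLoop x x.toNat 2 x 0

-- ===== PRECONDITION & SPEC =====
-- Pre_f excludes x ≤ 0, on which returnFactors returns None and f raises TypeError ('None is not subscriptable').
def Pre_f (x : Int) : Prop := 1 ≤ x
instance (x : Int) : Decidable (Pre_f x) := by unfold Pre_f; infer_instance
def pvWitness_f : Int := (12)

def Spec_f (x : Int) (out : Int) : Prop := out = f_alt x
instance (x : Int) (out : Int) : Decidable (Spec_f x out) := by unfold Spec_f; infer_instance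

-- ===== CLAIM (what is proved, stated in full; the proofs are below) =====
def Claim_equal_f : Prop := ∀ (x : Int), Dom_f x → Pre_f x → Spec_f x (f x)

-- ===== LEMMAS AND PROOFS =====

-- the arithmetic derivative of n, as a sum over the prime factorization: n' = Σ_{p ∈ factors n} n/p
def dArith (n : ℕ) : ℕ := (n.primeFactorsList.map (fun p => n / p)).sum

-- the same sum but with the numerators taken from a fixed x (what B's accumulator collects)
def dSum (x n : ℕ) : ℕ := (n.primeFactorsList.map (fun p => x / p)).sum

theorem dSum_self (n : ℕ) : dSum n n = dArith n := rfl

theorem dArith_one : dArith 1 = 0 := by simp [dArith]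

theorem dArith_prime {p : ℕ} (hp : p.Prime) : dArith p = 1 := by
  unfold dArith
  rw [Nat.primeFactorsList_prime hp]
  simp [Nat.div_self hp.pos]

theorem dArith_mul {a b : ℕ} (ha : a ≠ 0) (hb : b ≠ 0) :
    dArith (a * b) = b * dArith a + a * dArith b := by
  unfold dArith
  rw [((Nat.perm_primeFactorsList_mul ha hb).map _).sum_eq, List.map_append, List.sum_append]
  have h1 : (a.primeFactorsList.map fun p => a * b / p)
      = a.primeFactorsList.map fun p => b * (a / p) := by
    apply List.map_congr_left
    intro p hp
    rw [mul_comm a b, Nat.mul_div_assoc b (Nat.dvd_of_mem_primeFactorsList hp)]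
  have h2 : (b.primeFactorsList.map fun p => a * b / p)
      = b.primeFactorsList.map fun p => a * (b / p) := by
    apply List.map_congr_left
    intro p hp
    rw [Nat.mul_div_assoc a (Nat.dvd_of_mem_primeFactorsList hp)]
  rw [h1, h2, List.sum_map_mul_left, List.sum_map_mul_left]

theorem dSum_of_prime_dvd {x n p : ℕ} (hp : p.Prime) (hd : p ∣ n) (hn : n ≠ 0) :
    dSum x n = x / p + dSum x (n / p) := by
  unfold dSum
  have h1 : n = p * (n / p) := (Nat.mul_div_cancel' hd).symm
  have hq : n / p ≠ 0 := by
    intro h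
    rw [h, Nat.mul_zero] at h1
    exact hn h1
  conv_lhs => rw [h1]
  rw [((Nat.perm_primeFactorsList_mul hp.ne_zero hq).map _).sum_eq, List.map_append,
      List.sum_append, Nat.primeFactorsList_prime hp]
  simp

-- A's primality test agrees with Nat.Prime
theorem isPrimeA_iff (N : ℕ) : isPrimeA (N : Int) = true ↔ N.Prime := by
  unfold isPrimeA
  by_cases h1 : (N : Int) ≤ 1
  · simp only [if_pos h1, Bool.false_eq_true, false_iff]
    intro hp
    have := hp.two_le
    omega
  · rw [if_neg h1]
    by_cases h2 : (N : Int) = 2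
    · have hN : N = 2 := by exact_mod_cast h2
      simp [hN, Nat.prime_two]
    · rw [if_neg h2]
      have hN2 : 3 ≤ N := by omega
      by_cases h3 : 2 ∣ N
      · rw [if_pos ⟨by exact_mod_cast hN2, by
          rw [PySem.Int.mod_eq_zero_iff_dvd]; exact_mod_cast h3⟩]
        simp only [Bool.false_eq_true, false_iff]
        intro hp
        rcases hp.eq_one_or_self_of_dvd 2 h3 with h | h <;> omega
      · rw [if_neg (by
          intro hcon
          rw [PySem.Int.mod_eq_zero_iff_dvd] at hcon
          exact h3 (by exact_mod_cast hcon.2))]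
        rw [List.all_eq_true]
        constructor
        · intro hall
          by_contra hnp
          have hm := Nat.minFac_dvd N
          have hmp := Nat.minFac_prime (show N ≠ 1 by omega)
          have hne2 : N.minFac ≠ 2 := by
            intro h
            exact h3 (h ▸ hm)
          have h3le : 3 ≤ N.minFac := by
            have := hmp.two_le
            omega
          have hsq : N.minFac * N.minFac ≤ N := by
            have := Nat.minFac_sq_le_self (show 0 < N by omega) hnp
            rwa [pow_two] at this
          have hle : N.minFac ≤ N.sqrt := Nat.le_sqrt.mpr hsq
          have hodd : N.minFac % 2 = 1 := Nat.odd_iff.mp (hmp.odd_of_ne_two hne2)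
          have hmem : ((N.minFac : ℕ) : Int) ∈ PySem.List.pyRange 3 (1 + (Nat.sqrt N : Int)) 2 := by
            rw [PySem.List.mem_pyRange_iff_of_pos (by norm_num)]
            refine ⟨by exact_mod_cast h3le, by omega, by omega⟩
          have hres := hall _ hmem
          simp only [Bool.not_eq_eq_eq_not, Bool.not_true, beq_eq_false_iff_ne, ne_eq,
            PySem.Int.mod_eq_zero_iff_dvd] at hres
          exact hres (by exact_mod_cast hm)
        · intro hp i hi
          rw [PySem.List.mem_pyRange_iff_of_pos (by norm_num)] at hi
          simp only [Bool.not_eq_eq_eq_not, Bool.not_true, beq_eq_false_iff_ne, ne_eq,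
            PySem.Int.mod_eq_zero_iff_dvd]
          intro hdvd
          obtain ⟨m, rfl⟩ : ∃ m : ℕ, i = (m : Int) := ⟨i.toNat, by omega⟩
          have hmd : m ∣ N := by exact_mod_cast hdvd
          have hsl := Nat.sqrt_lt_self (show 1 < N by omega)
          rcases hp.eq_one_or_self_of_dvd m hmd with h | h
          · omega
          · have hlt : (m : Int) < 1 + (Nat.sqrt N : Int) := hi.2.1
            push_cast at hlt
            omega

-- phase 2 of the returnFactors loop: first factor p (odd) found, scanning for the cofactor q
theorem rfLoop_phase2 (N p q : ℕ) (hpq : p * q = N) (h3 : 3 ≤ p) (hple : p ≤ q)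
    (hqle : q ≤ N / 2) (fuel : ℕ) : ∀ i : ℕ, p < i → i ≤ q → q - i < fuel →
    rfLoop (N : Int) fuel (i : Int) [(p : Int)] = some [(p : Int), (q : Int)] := by
  induction fuel with
  | zero => intro i _ _ h; omega
  | succ fuel ih =>
    intro i hpi hiq hfuel
    have hcond : (i : Int) ≤ PySem.Int.floordiv (N : Int) 2 := by
      have : PySem.Int.floordiv (N : Int) 2 = ((N / 2 : ℕ) : Int) := by
        exact_mod_cast PySem.Int.floordiv_natCast N 2
      rw [this]
      exact_mod_cast le_trans hiq hqle
    have hp2 : ¬ ((p : Int) = 2) := by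
      intro h
      have : p = 2 := by exact_mod_cast h
      omega
    simp only [rfLoop, if_pos hcond]
    by_cases hiqeq : i = q
    · subst hiqeq
      have hmod : PySem.Int.mod (N : Int) (i : Int) = 0 := by
        rw [PySem.Int.mod_eq_zero_iff_dvd]
        exact_mod_cast Dvd.intro_left p hpq
      have hmul : (p : Int) * (i : Int) = (N : Int) := by exact_mod_cast hpq
      simp [hp2, hmod, hmul, PySem.List.pyGetD_ofNat']
    · have hne : ¬ ((p : Int) * (i : Int) = (N : Int)) := by
        intro h
        have hpi : p * i = N := by exact_mod_cast h
        have hcancel : p * i = p * q := by rw [hpi, hpq]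
        exact hiqeq (Nat.eq_of_mul_eq_mul_left (by omega) hcancel)
      have hstep : ((i : Int) + 1) = ((i + 1 : ℕ) : Int) := by push_cast; ring
      simp [hp2, hne, PySem.List.pyGetD_ofNat']
      rw [hstep]
      exact ih (i + 1) (by omega) (by omega) (by omega)

-- phase 1 of the returnFactors loop: scanning for the least factor p of an odd composite N
theorem rfLoop_phase1 (N p q : ℕ) (hminf : p = N.minFac) (hpq : p * q = N) (h3 : 3 ≤ p)
    (hple : p ≤ q) (hqle : q ≤ N / 2) (fuel : ℕ) : ∀ i : ℕ, 2 ≤ i → i ≤ p →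
    q + 1 - i < fuel →
    rfLoop (N : Int) fuel (i : Int) [] = some [(p : Int), (q : Int)] := by
  induction fuel with
  | zero => intro i _ h _; omega
  | succ fuel ih =>
    intro i h2i hip hfuel
    have hcond : (i : Int) ≤ PySem.Int.floordiv (N : Int) 2 := by
      have : PySem.Int.floordiv (N : Int) 2 = ((N / 2 : ℕ) : Int) := by
        exact_mod_cast PySem.Int.floordiv_natCast N 2
      rw [this]
      have : i ≤ N / 2 := by omega
      exact_mod_cast this
    have hp2 : ¬ ((p : Int) = 2) := by
      intro h
      have : p = 2 := by exact_mod_cast h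
      omega
    simp only [rfLoop, if_pos hcond]
    by_cases hipeq : i = p
    · subst hipeq
      have hmod : PySem.Int.mod (N : Int) (i : Int) = 0 := by
        rw [PySem.Int.mod_eq_zero_iff_dvd]
        exact_mod_cast Dvd.intro q hpq
      by_cases hq : q = i
      · -- N = p * p: the same i is appended twice and returned
        have hmul : (i : Int) * (i : Int) = (N : Int) := by
          subst hq
          exact_mod_cast hpq
        subst hq
        simp [hmod, hp2, hmul, PySem.List.pyGetD_ofNat']
      · have hne : ¬ ((i : Int) * (i : Int) = (N : Int)) := by
          intro h
          have hii : i * i = N := by exact_mod_cast h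
          have hcancel : i * i = i * q := by rw [hii, hpq]
          exact hq (Nat.eq_of_mul_eq_mul_left (by omega) hcancel).symm
        have hstep : ((i : Int) + 1) = ((i + 1 : ℕ) : Int) := by push_cast; ring
        simp [hmod, hp2, hne, PySem.List.pyGetD_ofNat']
        rw [hstep]
        exact rfLoop_phase2 N i q hpq h3 (by omega) hqle fuel (i + 1) (by omega) (by omega)
          (by omega)
    · -- i < p = minFac N: i does not divide N
      have hndvd : ¬ ((i : Int) ∣ (N : Int)) := by
        intro hdvd
        have hdN : i ∣ N := by exact_mod_cast hdvd
        have := Nat.minFac_le_of_dvd h2i hdN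
        omega
      simp [hndvd]
      exact ih (i + 1) (by omega) (by omega) (by omega)

-- characterization of returnFactors on a composite x ≥ 4: the pair (minFac, cofactor)
theorem returnFactorsA_eq (N : ℕ) (h4 : 4 ≤ N) (hc : ¬ N.Prime) :
    returnFactorsA (N : Int) = some [(N.minFac : Int), ((N / N.minFac : ℕ) : Int)] := by
  have hmp : N.minFac.Prime := Nat.minFac_prime (by omega)
  have hpd : N.minFac ∣ N := Nat.minFac_dvd N
  have hpq : N.minFac * (N / N.minFac) = N := Nat.mul_div_cancel' hpd
  have h2p : 2 ≤ N.minFac := hmp.two_le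
  have hple : N.minFac ≤ N / N.minFac := by
    have hsq : N.minFac * N.minFac ≤ N := by
      have := Nat.minFac_sq_le_self (by omega) hc
      rwa [pow_two] at this
    exact Nat.le_of_mul_le_mul_left (le_of_le_of_eq hsq hpq.symm) (by omega)
  have hqle : N / N.minFac ≤ N / 2 := Nat.div_le_div_left h2p (by omega)
  unfold returnFactorsA
  rw [Int.toNat_natCast]
  by_cases he : 2 ∣ N
  · -- N even: the first iteration (i = 2) already returns [2, N // 2]
    have hp2 : N.minFac = 2 := le_antisymm (Nat.minFac_le_of_dvd le_rfl he) h2p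
    have hcond : (2 : Int) ≤ PySem.Int.floordiv (N : Int) 2 := by
      have hdq : 2 ≤ N / 2 := by omega
      calc (2 : Int) ≤ ((N / 2 : ℕ) : Int) := by exact_mod_cast hdq
        _ = PySem.Int.floordiv (N : Int) 2 := by
            exact_mod_cast (PySem.Int.floordiv_natCast N 2).symm
    have hdvd2 : ((2 : Int)) ∣ (N : Int) := by exact_mod_cast he
    have hmodNN : PySem.Int.mod (N : Int) (N : Int) = 0 :=
      (PySem.Int.mod_eq_zero_iff_dvd _ _).mpr dvd_rfl
    have hfd : PySem.Int.floordiv (N : Int) 2 = ((N / 2 : ℕ) : Int) := by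
      exact_mod_cast PySem.Int.floordiv_natCast N 2
    simp only [rfLoop, if_pos hcond]
    simp [hdvd2, hmodNN, PySem.List.pyGetD_ofNat', hp2]
  · -- N odd composite: the two scanning phases find (minFac, cofactor)
    have h3p : 3 ≤ N.minFac := by
      have hne2 : N.minFac ≠ 2 := fun h => he (h ▸ hpd)
      omega
    have := rfLoop_phase1 N N.minFac (N / N.minFac) rfl hpq h3p hple hqle (N + 1) 2
      le_rfl h2p (by omega)
    simpa using this

theorem fA_eq (fuel : ℕ) : ∀ (N : ℕ), 1 ≤ N → N ≤ fuel → fA fuel (N : Int) = (dArith N : Int) := by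
  induction fuel with
  | zero => intro N h1 h2; omega
  | succ fuel ih =>
    intro N h1 h2
    by_cases hN1 : N = 1
    · subst hN1
      simp [fA, dArith_one]
    · have hne1 : ¬ ((N : Int) = 1) := fun h => hN1 (by exact_mod_cast h)
      by_cases hp : N.Prime
      · simp only [fA, if_neg hne1, if_pos ((isPrimeA_iff N).mpr hp)]
        rw [dArith_prime hp]
        norm_num
      · have h4 : 4 ≤ N := by
          by_contra hcon
          have : N = 2 ∨ N = 3 := by omega
          rcases this with rfl | rfl
          · exact hp Nat.prime_two
          · exact hp Nat.prime_three
        have hnpA : ¬ (isPrimeA (N : Int) = true) := fun h => hp ((isPrimeA_iff N).mp h)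
        have hmp : N.minFac.Prime := Nat.minFac_prime (by omega)
        have hpd : N.minFac ∣ N := Nat.minFac_dvd N
        have hpq : N.minFac * (N / N.minFac) = N := Nat.mul_div_cancel' hpd
        have h2p : 2 ≤ N.minFac := hmp.two_le
        have hq2 : 2 ≤ N / N.minFac := by
          by_contra hcon
          have hlt : N / N.minFac < 2 := Nat.lt_of_not_le hcon
          have h01 : N / N.minFac = 0 ∨ N / N.minFac = 1 := by
            rcases Nat.lt_succ_iff_lt_or_eq.mp hlt with h | h
            · exact Or.inl (Nat.lt_one_iff.mp h)
            · exact Or.inr h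
          rcases h01 with h | h
          · rw [h, Nat.mul_zero] at hpq
            omega
          · rw [h, Nat.mul_one] at hpq
            exact hp (hpq ▸ hmp)
        have hqle : N / N.minFac ≤ N / 2 := Nat.div_le_div_left h2p (by omega)
        have hple : N.minFac ≤ N / 2 := by
          have : N.minFac ≤ N / N.minFac := by
            have hsq : N.minFac * N.minFac ≤ N := by
              have := Nat.minFac_sq_le_self (by omega) hp
              rwa [pow_two] at this
            exact Nat.le_of_mul_le_mul_left (le_of_le_of_eq hsq hpq.symm) (by omega)
          omega
        have hhalf : N / 2 ≤ fuel := by omega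
        simp only [fA, if_neg hne1, if_neg hnpA, returnFactorsA_eq N h4 hp,
          PySem.List.pyGetD_ofNat']
        simp only [List.getD_cons_zero, List.getD_cons_succ]
        rw [ih N.minFac (by omega) (by omega), ih (N / N.minFac) (by omega) (by omega)]
        have := dArith_mul (a := N.minFac) (b := N / N.minFac) (by omega) (by omega)
        rw [hpq] at this
        rw [this]
        push_cast
        ring

-- the inner while-loop strips all copies of pp from N, adding X//pp for each
theorem stripLoop_eq (X pp : ℕ) (h2 : 2 ≤ pp) :
    ∀ (fuel N : ℕ) (d : Int), 1 ≤ N → N ≤ fuel → N ∣ X →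
    (∀ r : ℕ, r.Prime → r ∣ N → pp ≤ r) →
    ∃ N' : ℕ, stripLoop (X : Int) (pp : Int) fuel (N : Int) d
        = ((N' : Int), d + (dSum X N : Int) - (dSum X N' : Int))
      ∧ N' ∣ N ∧ 1 ≤ N' ∧ ¬ pp ∣ N'
      ∧ (∀ r : ℕ, r.Prime → r ∣ N' → pp ≤ r) := by
  intro fuel
  induction fuel with
  | zero => intro N d h1 h0 _ _; omega
  | succ fuel ih =>
    intro N d h1 hle hdX hfac
    by_cases hdvd : pp ∣ N
    · -- pp divides N, and is then its least prime factor, hence prime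
      have hppp : pp.Prime := by
        have hmp := Nat.minFac_prime (show pp ≠ 1 by omega)
        have hge := hfac pp.minFac hmp ((Nat.minFac_dvd pp).trans hdvd)
        have hle' := Nat.minFac_le (show 0 < pp by omega)
        have hfix : pp.minFac = pp := le_antisymm hle' hge
        exact hfix ▸ hmp
      have hmod : PySem.Int.mod (N : Int) (pp : Int) = 0 := by
        rw [PySem.Int.mod_eq_zero_iff_dvd]
        exact_mod_cast hdvd
      simp only [stripLoop, if_pos hmod, PySem.Int.floordiv_natCast]
      have hNq : N / pp ∣ N := Nat.div_dvd_of_dvd hdvd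
      have h1' : 1 ≤ N / pp := (Nat.one_le_div_iff (by omega)).mpr (Nat.le_of_dvd (by omega) hdvd)
      have hle2 : N / pp ≤ fuel := by
        have := Nat.div_lt_self (show 0 < N by omega) (show 1 < pp by omega)
        omega
      obtain ⟨N', hrun, hd1, hd2, hd3, hd4⟩ := ih (N / pp) (d + ((X / pp : ℕ) : Int)) h1'
        hle2 (hNq.trans hdX) (fun r hr hd => hfac r hr (hd.trans hNq))
      refine ⟨N', ?_, hd1.trans hNq, hd2, hd3, hd4⟩
      rw [hrun, dSum_of_prime_dvd hppp hdvd (by omega)]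
      push_cast
      ring_nf
    · have hmod : ¬ (PySem.Int.mod (N : Int) (pp : Int) = 0) := by
        rw [PySem.Int.mod_eq_zero_iff_dvd]
        intro h
        exact hdvd (by exact_mod_cast h)
      simp only [stripLoop, if_neg hmod]
      exact ⟨N, by simp, dvd_rfl, h1, hdvd, hfac⟩

-- the outer trial-division loop accumulates the whole derivative sum
theorem outerLoop_eq (X : ℕ) :
    ∀ (fuel pp N : ℕ) (d : Int), 2 ≤ pp → 1 ≤ N → N ∣ X →
    (∀ r : ℕ, r.Prime → r ∣ N → pp ≤ r) →
    N + 2 ≤ fuel + pp →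
    outerLoop (X : Int) fuel (pp : Int) (N : Int) d = d + (dSum X N : Int) := by
  intro fuel
  induction fuel with
  | zero =>
    intro pp N d h2 h1 _ hfac hf
    have hN1 : N = 1 := by
      by_contra h
      have hmp := Nat.minFac_prime h
      have hge := hfac _ hmp (Nat.minFac_dvd N)
      have hle := Nat.minFac_le (show 0 < N by omega)
      omega
    subst hN1
    simp [outerLoop, dSum, Nat.primeFactorsList_one]
  | succ fuel ih =>
    intro pp N d h2 h1 hdX hfac hf
    by_cases hcond : (pp : Int) * (pp : Int) ≤ (N : Int)
    · have hcondN : pp * pp ≤ N := by exact_mod_cast hcond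
      simp only [outerLoop, if_pos hcond, Int.toNat_natCast]
      obtain ⟨N', hrun, hd1, hd2, hd3, hd4⟩ := stripLoop_eq X pp h2 N N d h1 le_rfl hdX hfac
      rw [hrun]
      have hstep : ((pp : Int) + 1) = ((pp + 1 : ℕ) : Int) := by push_cast; ring
      rw [hstep]
      have hN'le : N' ≤ N := Nat.le_of_dvd (by omega) hd1
      have hppN : pp ≤ N := by
        have : pp * 1 ≤ pp * pp := Nat.mul_le_mul_left pp (by omega)
        omega
      rw [ih (pp + 1) N' _ (by omega) hd2 (hd1.trans hdX)
        (fun r hr hd => by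
          have hge := hd4 r hr hd
          have hne : r ≠ pp := fun h => hd3 (h ▸ hd)
          omega)
        (by omega)]
      ring
    · simp only [outerLoop, if_neg hcond]
      have hcondN : ¬ (pp * pp ≤ N) := fun h => hcond (by exact_mod_cast h)
      by_cases hN1 : 1 < N
      · have hNp : N.Prime := by
          by_contra hnp
          have hsq := Nat.minFac_sq_le_self (show 0 < N by omega) hnp
          rw [pow_two] at hsq
          have hge := hfac _ (Nat.minFac_prime (by omega)) (Nat.minFac_dvd N)
          have : pp * pp ≤ N.minFac * N.minFac := Nat.mul_le_mul hge hge
          omega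
        rw [if_pos (show (1 : Int) < (N : Int) by exact_mod_cast hN1)]
        have hsum : dSum X N = X / N := by
          unfold dSum
          rw [Nat.primeFactorsList_prime hNp]
          simp
        rw [hsum, PySem.Int.floordiv_natCast]
      · rw [if_neg (show ¬ ((1 : Int) < (N : Int)) by exact_mod_cast hN1)]
        have : N = 1 := by omega
        subst this
        simp [dSum, Nat.primeFactorsList_one]

theorem f_alt_eq (N : ℕ) (h1 : 1 ≤ N) : f_alt (N : Int) = (dArith N : Int) := by
  unfold f_alt
  rw [Int.toNat_natCast]
  have h := outerLoop_eq N N 2 N 0 (by norm_num) h1 dvd_rfl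
    (fun r hr _ => hr.two_le) (by omega)
  rw [dSum_self] at h
  simpa using h

-- ===== VERDICT (by name: the statement is the Claim_ definition above) =====
theorem f_spec : Claim_equal_f := by
  intro x _ hpre
  unfold Spec_f
  obtain ⟨N, rfl⟩ : ∃ N : ℕ, x = (N : Int) := ⟨x.toNat, by have : 1 ≤ x := hpre; omega⟩
  have h1 : 1 ≤ N := by unfold Pre_f at hpre; exact_mod_cast hpre
  rw [f_alt_eq N h1]
  show fA ((N : Int)).toNat _ = _
  rw [Int.toNat_natCast]
  exact fA_eq N N h1 le_rfl
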